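-- pv_equiv track=rewrite | github.com/pauline2k/ripley | ripley/lib/calnet_utils.py | roles_from_affiliations
-- ===== SOURCE A (Python) =====
-- def roles_from_affiliations(affiliations):
--     return {
--         'advisor': False,
--         'concurrentEnrollmentStudent': False,
--         'expiredAccount': False,
--         'exStudent': any(item for item in affiliations if item in ['SIS-EXTENDED', 'FORMER-STUDENT', 'AFFILIATE-TYPE-ADVCON-ALUMNUS']),
--         'faculty': 'EMPLOYEE-TYPE-ACADEMIC' in affiliations,
--         'graduate': False,
--         'guest': 'GUEST-TYPE-SPONSORED' in affiliations,
--         'law': False,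
--         'registered': 'STUDENT-TYPE-REGISTERED' in affiliations,
--         'releasedAdmit': False,
--         'staff': 'EMPLOYEE-TYPE-STAFF' in affiliations,
--         'student': any(item for item in affiliations if item in ['STUDENT-TYPE-REGISTERED', 'STUDENT-TYPE-NOT-REGISTERED']),
--         'undergrad': False,
--     }
-- ===== SOURCE B (Python) =====
-- def roles_from_affiliations(affiliations):
--     faculty = guest = registered = staff = ex_student = student = False
--     for item in affiliations:
--         if item == 'EMPLOYEE-TYPE-ACADEMIC':
--             faculty = True
--         elif item == 'GUEST-TYPE-SPONSORED':
--             guest = True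
--         elif item == 'EMPLOYEE-TYPE-STAFF':
--             staff = True
--         elif item == 'STUDENT-TYPE-REGISTERED':
--             registered = True
--             student = True
--         elif item == 'STUDENT-TYPE-NOT-REGISTERED':
--             student = True
--         elif item in ('SIS-EXTENDED', 'FORMER-STUDENT', 'AFFILIATE-TYPE-ADVCON-ALUMNUS'):
--             ex_student = True
--     return {
--         'advisor': False,
--         'concurrentEnrollmentStudent': False,
--         'expiredAccount': False,
--         'exStudent': ex_student,
--         'faculty': faculty,
--         'graduate': False,
--         'guest': guest,
--         'law': False,
--         'registered': registered,
--         'releasedAdmit': False,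
--         'staff': staff,
--         'student': student,
--         'undergrad': False,
--     }
-- ===== Notes on version B (the rewrite author's own statement) =====
-- stated objective: alternative
-- what changed: Replaces A's six independent scans of the affiliation list (two 'in' membership tests per any() plus four 'in' checks) with a single pass that accumulates all six flags in one loop over the list.
import Mathlib
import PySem

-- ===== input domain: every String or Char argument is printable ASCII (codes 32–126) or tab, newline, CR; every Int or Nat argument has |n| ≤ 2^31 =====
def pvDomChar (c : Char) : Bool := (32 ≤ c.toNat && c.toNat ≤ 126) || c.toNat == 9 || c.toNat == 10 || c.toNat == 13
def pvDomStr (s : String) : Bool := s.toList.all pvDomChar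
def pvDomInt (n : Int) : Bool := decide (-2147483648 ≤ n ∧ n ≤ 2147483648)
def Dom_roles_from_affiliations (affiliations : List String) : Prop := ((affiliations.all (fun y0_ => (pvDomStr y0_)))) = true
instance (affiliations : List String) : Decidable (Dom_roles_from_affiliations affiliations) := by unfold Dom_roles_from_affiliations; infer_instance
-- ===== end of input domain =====

-- ===== PORT A =====
-- B differs from A only in decomposition: one accumulating pass instead of six scans (objective: alternative).
-- A's 'any(item for item in affiliations if item in L)': filter by membership, then any() tests truthiness (non-empty string).
def roles_from_affiliations (affiliations : List String) : List (String × Bool) :=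
  [("advisor", false),
   ("concurrentEnrollmentStudent", false),
   ("expiredAccount", false),
   ("exStudent", (affiliations.filter (fun item => item ∈ ["SIS-EXTENDED", "FORMER-STUDENT", "AFFILIATE-TYPE-ADVCON-ALUMNUS"])).any (fun item => item ≠ "")),
   ("faculty", affiliations.contains "EMPLOYEE-TYPE-ACADEMIC"),
   ("graduate", false),
   ("guest", affiliations.contains "GUEST-TYPE-SPONSORED"),
   ("law", false),
   ("registered", affiliations.contains "STUDENT-TYPE-REGISTERED"),
   ("releasedAdmit", false),
   ("staff", affiliations.contains "EMPLOYEE-TYPE-STAFF"),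
   ("student", (affiliations.filter (fun item => item ∈ ["STUDENT-TYPE-REGISTERED", "STUDENT-TYPE-NOT-REGISTERED"])).any (fun item => item ≠ "")),
   ("undergrad", false)]

-- ===== PORT B =====
-- single-pass flag accumulator; state = (faculty, guest, registered, staff, ex_student, student)
def rfaStep (s : Bool × Bool × Bool × Bool × Bool × Bool) (item : String) :
    Bool × Bool × Bool × Bool × Bool × Bool :=
  let (f, g, r, st, ex, stu) := s
  if item = "EMPLOYEE-TYPE-ACADEMIC" then (true, g, r, st, ex, stu)
  else if item = "GUEST-TYPE-SPONSORED" then (f, true, r, st, ex, stu)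
  else if item = "EMPLOYEE-TYPE-STAFF" then (f, g, r, true, ex, stu)
  else if item = "STUDENT-TYPE-REGISTERED" then (f, g, true, st, ex, true)
  else if item = "STUDENT-TYPE-NOT-REGISTERED" then (f, g, r, st, ex, true)
  else if item ∈ ["SIS-EXTENDED", "FORMER-STUDENT", "AFFILIATE-TYPE-ADVCON-ALUMNUS"] then (f, g, r, st, true, stu)
  else (f, g, r, st, ex, stu)

def roles_from_affiliations_alt (affiliations : List String) : List (String × Bool) :=
  let (f, g, r, st, ex, stu) := affiliations.foldl rfaStep (false, false, false, false, false, false)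
  [("advisor", false),
   ("concurrentEnrollmentStudent", false),
   ("expiredAccount", false),
   ("exStudent", ex),
   ("faculty", f),
   ("graduate", false),
   ("guest", g),
   ("law", false),
   ("registered", r),
   ("releasedAdmit", false),
   ("staff", st),
   ("student", stu),
   ("undergrad", false)]

-- ===== PRECONDITION & SPEC =====
def Spec_roles_from_affiliations (affiliations : List String) (out : List (String × Bool)) : Prop := out = roles_from_affiliations_alt affiliations
instance (affiliations : List String) (out : List (String × Bool)) : Decidable (Spec_roles_from_affiliations affiliations out) := by unfold Spec_roles_from_affiliations; infer_instance

-- ===== CLAIM =====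
def Claim_equal_roles_from_affiliations : Prop := ∀ (affiliations : List String), Dom_roles_from_affiliations affiliations → Spec_roles_from_affiliations affiliations (roles_from_affiliations affiliations)

-- ===== LEMMAS AND PROOFS =====
theorem rfa_foldl_char (l : List String) (f g r st ex stu : Bool) :
    l.foldl rfaStep (f, g, r, st, ex, stu) =
      (f || l.contains "EMPLOYEE-TYPE-ACADEMIC",
       g || l.contains "GUEST-TYPE-SPONSORED",
       r || l.contains "STUDENT-TYPE-REGISTERED",
       st || l.contains "EMPLOYEE-TYPE-STAFF",
       ex || (l.filter (fun item => item ∈ ["SIS-EXTENDED", "FORMER-STUDENT", "AFFILIATE-TYPE-ADVCON-ALUMNUS"])).any (fun item => item ≠ ""),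
       stu || (l.filter (fun item => item ∈ ["STUDENT-TYPE-REGISTERED", "STUDENT-TYPE-NOT-REGISTERED"])).any (fun item => item ≠ "")) := by
  induction l generalizing f g r st ex stu with
  | nil => simp
  | cons x xs ih =>
    simp only [List.foldl_cons, rfaStep]
    split_ifs with h1 h2 h3 h4 h5 h6
    · subst h1; simp [ih]
    · subst h2; simp [ih]
    · subst h3; simp [ih]
    · subst h4; simp [ih]
    · subst h5; simp [ih]
    · simp only [List.mem_cons, List.not_mem_nil, or_false] at h6
      rcases h6 with rfl | rfl | rfl <;> simp [ih]
    · simp only [List.mem_cons, List.not_mem_nil, or_false, not_or] at h6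
      obtain ⟨e1, e2, e3⟩ := h6
      simp [ih, Ne.symm h1, Ne.symm h2, Ne.symm h3, Ne.symm h4, h4, h5, e1, e2, e3]

-- ===== VERDICT =====
theorem roles_from_affiliations_spec : Claim_equal_roles_from_affiliations := by
  intro l _
  show roles_from_affiliations l = roles_from_affiliations_alt l
  simp [roles_from_affiliations, roles_from_affiliations_alt, rfa_foldl_char]
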